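-- pv_equiv track=rewrite | github.com/ldk999/CoMeT | comet_tasmoe/workloads/generate_traces.py | _infer_expert_count
-- ===== SOURCE A (Python) =====
-- def _infer_expert_count(model_name: str) -> int:
--     digits: list[str] = []
--     for ch in model_name:
--         if ch.isdigit():
--             digits.append(ch)
--         elif digits:
--             break
--     if not digits:
--         return 8
--     return max(1, int(''.join(digits)))
-- ===== SOURCE B (Python) =====
-- import re
--
-- def _infer_expert_count(model_name: str) -> int:
--     m = re.search(r'\d+', model_name)
--     if m is None:
--         return 8
--     return max(1, int(m.group()))
-- ===== Notes on version B (the rewrite author's own statement) =====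
-- stated objective: idiomatic
-- what changed: Replaces the manual accumulate-into-a-list loop with break logic by a single regex search for the first contiguous digit run (re.search(r'\d+')), removing all explicit looping and state; the scan runs in the regex engine rather than the Python interpreter.
import Mathlib
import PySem

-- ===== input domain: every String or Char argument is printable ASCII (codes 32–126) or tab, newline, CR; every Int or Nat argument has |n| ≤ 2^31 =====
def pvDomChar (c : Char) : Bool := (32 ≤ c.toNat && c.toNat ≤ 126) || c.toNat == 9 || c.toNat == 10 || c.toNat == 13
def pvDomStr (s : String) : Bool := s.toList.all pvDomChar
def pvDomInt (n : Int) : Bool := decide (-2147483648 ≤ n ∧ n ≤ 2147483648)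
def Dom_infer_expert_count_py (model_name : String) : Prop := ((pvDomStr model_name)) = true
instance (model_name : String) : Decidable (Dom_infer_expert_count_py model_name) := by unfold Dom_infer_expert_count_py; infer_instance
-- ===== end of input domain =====

-- B replaces A's accumulate-and-break loop by a single regex search for the first digit run (more idiomatic).

-- ===== PORT A =====
-- the for-loop: digits is the accumulator; 'elif digits: break' stops at the first non-digit after a digit
def pvLoopA (digits : List Char) : List Char → List Char
  | [] => digits
  | c :: cs =>
    if PySem.Chars.isdigit c then pvLoopA (digits ++ [c]) cs
    else if !digits.isEmpty then digits
    else pvLoopA digits cs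

def infer_expert_count_py (model_name : String) : Int :=
  let digits := pvLoopA [] model_name.toList
  if digits.isEmpty then 8
  -- int(''.join(digits)): cannot raise here (digits is a nonempty run of '0'-'9'), so getD's default is unreachable
  else max 1 ((PySem.Int.ofChars? digits).getD 0)

-- ===== PORT B =====
-- re.search(r'\d+', model_name): the first contiguous digit run = takeWhile digit after dropWhile non-digit
-- (\d on the ASCII domain is exactly '0'-'9' = PySem.Chars.isdigit)
def infer_expert_count_py_alt (model_name : String) : Int :=
  let run := (model_name.toList.dropWhile (fun c => !PySem.Chars.isdigit c)).takeWhile PySem.Chars.isdigit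
  if run.isEmpty then 8
  else max 1 ((PySem.Int.ofChars? run).getD 0)

-- ===== PRECONDITION & SPEC =====
def Spec_infer_expert_count_py (model_name : String) (out : Int) : Prop := out = infer_expert_count_py_alt model_name
instance (model_name : String) (out : Int) : Decidable (Spec_infer_expert_count_py model_name out) := by unfold Spec_infer_expert_count_py; infer_instance

-- ===== CLAIM (what is proved, stated in full; the proofs are below) =====
def Claim_equal_infer_expert_count_py : Prop := ∀ (model_name : String), Dom_infer_expert_count_py model_name → Spec_infer_expert_count_py model_name (infer_expert_count_py model_name)

-- ===== LEMMAS AND PROOFS =====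

-- once the accumulator is nonempty, the loop appends the following digit run and stops
theorem pvLoopA_nonempty (cs : List Char) : ∀ (digits : List Char), digits ≠ [] →
    pvLoopA digits cs = digits ++ cs.takeWhile PySem.Chars.isdigit := by
  induction cs with
  | nil => intro digits _; simp [pvLoopA]
  | cons c cs ih =>
    intro digits hne
    by_cases hc : PySem.Chars.isdigit c
    · simp [pvLoopA, hc, ih (digits ++ [c]) (by simp)]
    · simp [pvLoopA, hc, hne]

-- from an empty accumulator, the loop computes the first digit run
theorem pvLoopA_nil (cs : List Char) :
    pvLoopA [] cs = (cs.dropWhile (fun c => !PySem.Chars.isdigit c)).takeWhile PySem.Chars.isdigit := by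
  induction cs with
  | nil => simp [pvLoopA]
  | cons c cs ih =>
    by_cases hc : PySem.Chars.isdigit c
    · simp [pvLoopA, hc, pvLoopA_nonempty cs [c] (by simp)]
    · simp [pvLoopA, hc, ih]

-- ===== VERDICT (by name: the statement is the Claim_ definition above) =====
theorem infer_expert_count_py_spec : Claim_equal_infer_expert_count_py := by
  intro model_name _
  unfold Spec_infer_expert_count_py infer_expert_count_py infer_expert_count_py_alt
  rw [pvLoopA_nil]
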